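-- pv_equiv track=rewrite | github.com/bihealth/svirlpool | src/svirlpool/util/util.py | get_hash_of_kmer
-- ===== SOURCE A (Python) =====
-- def get_hash_of_kmer(kmer: str, letter_dict: dict) -> int:
--     if not kmer or len(kmer) == 0:
--         raise ValueError("kmer must not be empty")
--     n_letters = len(letter_dict)
--     k = len(kmer)
--     hash_a = sum(
--         letter_dict.get(kmer[i], len(letter_dict)) * n_letters ** (k - i - 1)
--         for i in range(k)
--     )
--     # kmer_rc = str(Seq(kmer).reverse_complement())
--     # hash_b = sum([letter_dict.get(kmer_rc[i],len(letter_dict)) * n_letters**(k-i-1) for i in range(k)])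
--     return hash_a  # min(hash_a,hash_b)
-- ===== SOURCE B (Python) =====
-- def get_hash_of_kmer(kmer: str, letter_dict: dict) -> int:
--     if not kmer or len(kmer) == 0:
--         raise ValueError("kmer must not be empty")
--     n_letters = len(letter_dict)
--     h = 0
--     for ch in kmer:
--         h = h * n_letters + letter_dict.get(ch, n_letters)
--     return h
-- ===== Notes on version B (the rewrite author's own statement) =====
-- stated objective: faster
-- what changed: Replaces the per-position sum of digit * n_letters**(k-i-1) (a fresh big-int power for every index) with a single left-to-right Horner pass h = h*n_letters + digit.
import Mathlib
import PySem

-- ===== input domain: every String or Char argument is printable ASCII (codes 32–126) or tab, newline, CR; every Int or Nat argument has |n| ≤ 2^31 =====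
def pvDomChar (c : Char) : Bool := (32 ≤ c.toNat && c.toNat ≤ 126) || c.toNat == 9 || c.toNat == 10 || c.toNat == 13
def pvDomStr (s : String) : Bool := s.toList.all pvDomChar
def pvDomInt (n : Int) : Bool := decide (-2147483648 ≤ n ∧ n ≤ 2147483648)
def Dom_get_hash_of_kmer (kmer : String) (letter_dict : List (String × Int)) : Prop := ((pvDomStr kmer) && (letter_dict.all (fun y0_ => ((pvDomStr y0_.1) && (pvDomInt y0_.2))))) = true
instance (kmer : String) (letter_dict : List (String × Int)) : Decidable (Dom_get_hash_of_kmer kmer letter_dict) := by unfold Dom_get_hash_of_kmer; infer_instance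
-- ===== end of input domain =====

-- B replaces A's per-position powers n_letters**(k-i-1) with one Horner pass (measurably faster asymptotically).


-- ===== PORT A =====
-- sum over i in range(k) of letter_dict.get(kmer[i], n_letters) * n_letters ** (k-i-1)
def get_hash_of_kmer (kmer : String) (letter_dict : List (String × Int)) : Int :=
  let d := PySem.Dict.ofList letter_dict
  let n_letters : Int := d.size
  let cs := kmer.toList
  let k := cs.length
  ((List.range k).map
    (fun i => d.getD (String.ofList [cs.getD i ' ']) n_letters * n_letters ^ (k - i - 1))).sum

-- ===== PORT B =====
-- Horner: h = h * n_letters + digit, one pass over the characters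
def get_hash_of_kmer_alt (kmer : String) (letter_dict : List (String × Int)) : Int :=
  let d := PySem.Dict.ofList letter_dict
  let n_letters : Int := d.size
  kmer.toList.foldl (fun h ch => h * n_letters + d.getD (String.ofList [ch]) n_letters) 0

-- ===== PRECONDITION & SPEC =====
-- A raises ValueError on the empty kmer (and B does too); everything else is admitted.
def Pre_get_hash_of_kmer (kmer : String) (letter_dict : List (String × Int)) : Prop :=
  kmer.toList ≠ []
instance (kmer : String) (letter_dict : List (String × Int)) : Decidable (Pre_get_hash_of_kmer kmer letter_dict) := by unfold Pre_get_hash_of_kmer; infer_instance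
def pvWitness_get_hash_of_kmer : String × (List (String × Int)) :=
  ("ACT", [("A", 0), ("C", 1), ("G", 2), ("T", 3)])
def Spec_get_hash_of_kmer (kmer : String) (letter_dict : List (String × Int)) (out : Int) : Prop := out = get_hash_of_kmer_alt kmer letter_dict
instance (kmer : String) (letter_dict : List (String × Int)) (out : Int) : Decidable (Spec_get_hash_of_kmer kmer letter_dict out) := by unfold Spec_get_hash_of_kmer; infer_instance

-- ===== CLAIM (what is proved, stated in full; the proofs are below) =====
def Claim_equal_get_hash_of_kmer : Prop := ∀ (kmer : String) (letter_dict : List (String × Int)), Dom_get_hash_of_kmer kmer letter_dict → Pre_get_hash_of_kmer kmer letter_dict → Spec_get_hash_of_kmer kmer letter_dict (get_hash_of_kmer kmer letter_dict)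

-- ===== LEMMAS AND PROOFS =====

-- Horner's fold with accumulator h equals h * n^len + the positional sum.
theorem horner_eq_sum (n : Int) (g : Char → Int) :
    ∀ (cs : List Char) (h : Int),
      cs.foldl (fun h ch => h * n + g ch) h
        = h * n ^ cs.length
          + ((List.range cs.length).map
              (fun i => g (cs.getD i ' ') * n ^ (cs.length - i - 1))).sum := by
  intro cs
  induction cs with
  | nil => intro h; simp
  | cons c cs ih =>
    intro h
    simp only [List.foldl_cons, ih, List.length_cons, List.range_succ_eq_map,
      List.map_cons, List.map_map, List.sum_cons]
    have : ((List.range cs.length).map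
        ((fun i => g ((c :: cs).getD i ' ') * n ^ (cs.length + 1 - i - 1)) ∘ (· + 1)))
        = (List.range cs.length).map (fun i => g (cs.getD i ' ') * n ^ (cs.length - i - 1)) := by
      apply List.map_congr_left
      intro i hi
      simp [Function.comp]
    rw [this]
    have h0 : (c :: cs).getD 0 ' ' = c := rfl
    have he : cs.length + 1 - 0 - 1 = cs.length := by omega
    rw [h0, he]
    ring

-- ===== VERDICT (by name: the statement is the Claim_ definition above) =====
theorem get_hash_of_kmer_spec : Claim_equal_get_hash_of_kmer := by
  intro kmer letter_dict _ _
  show get_hash_of_kmer kmer letter_dict = get_hash_of_kmer_alt kmer letter_dict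
  unfold get_hash_of_kmer get_hash_of_kmer_alt
  rw [horner_eq_sum]
  simp
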